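-- pv_equiv track=rewrite | github.com/kurosawa-kuro/pnpm-type-script-nextjs | infrastructure/cdk/LogAnalytics3/athena/lib/process_api_logs_filter.py | filter_records
-- ===== SOURCE A (Python) =====
-- def filter_records(rec):
--     # 1. "level" キーが存在するかチェック
--     if 'level' not in rec:
--         return False
--
--     # 2. "level" キーが None または空文字でないことをチェック
--     if rec['level'] is None or str(rec['level']).strip() == '':
--         return False
--
--     # 3. その他のフィールドが全て空でないことをチェック
--     return not all(
--         value is None or str(value).strip() == ''
--         for value in rec.values()
--     )
-- ===== SOURCE B (Python) =====
-- def filter_records(rec):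
--     # Once 'level' exists and is non-empty, the original "not all(...)" scan over
--     # rec.values() is always True (level's own value is non-empty), so no loop is needed.
--     return ('level' in rec
--             and rec['level'] is not None
--             and str(rec['level']).strip() != '')
-- ===== Notes on version B (the rewrite author's own statement) =====
-- stated objective: simpler
-- what changed: B drops A's generator pass over all rec.values(): after the level checks that 'not all(...)' is provably always True (level's value is itself non-empty), so B is a single constant-work conjunction on the 'level' entry.
import Mathlib
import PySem

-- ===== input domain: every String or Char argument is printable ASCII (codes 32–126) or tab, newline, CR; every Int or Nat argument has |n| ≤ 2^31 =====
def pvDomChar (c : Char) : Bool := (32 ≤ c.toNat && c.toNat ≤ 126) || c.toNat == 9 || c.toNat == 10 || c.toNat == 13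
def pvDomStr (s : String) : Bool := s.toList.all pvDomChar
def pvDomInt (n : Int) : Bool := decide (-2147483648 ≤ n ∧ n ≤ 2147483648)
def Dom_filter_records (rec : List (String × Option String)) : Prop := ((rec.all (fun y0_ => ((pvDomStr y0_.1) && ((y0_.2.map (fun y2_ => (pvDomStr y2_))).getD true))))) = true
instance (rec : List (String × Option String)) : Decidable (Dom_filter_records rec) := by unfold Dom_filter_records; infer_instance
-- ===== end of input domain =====

-- B drops A's always-True scan over rec.values(): after the level checks, B is a single
-- conjunction on the 'level' entry (objective: simpler).


-- ===== PORT A =====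
-- value is None or str(value).strip() == ''
def pvEmptyValA (v : Option String) : Bool :=
  match v with
  | none => true
  | some s => PySem.Str.strip s == ""

def filter_records (rec : List (String × Option String)) : Bool :=
  -- 1. 'level' not in rec
  if !(rec.any (fun p => p.1 == "level")) then false
  else
    -- 2. rec['level'] is None or str(rec['level']).strip() == ''  (dict lookup = first match)
    match rec.find? (fun p => p.1 == "level") with
    | none => false
    | some p =>
      if pvEmptyValA p.2 then false
      -- 3. not all(... for value in rec.values())
      else !((rec.map (fun q => q.2)).all pvEmptyValA)

-- ===== PORT B =====
def filter_records_alt (rec : List (String × Option String)) : Bool :=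
  match rec.find? (fun p => p.1 == "level") with
  | none => false
  | some (_, none) => false
  | some (_, some s) => PySem.Str.strip s != ""

-- ===== PRECONDITION & SPEC =====
def Spec_filter_records (rec : List (String × Option String)) (out : Bool) : Prop := out = filter_records_alt rec
instance (rec : List (String × Option String)) (out : Bool) : Decidable (Spec_filter_records rec out) := by unfold Spec_filter_records; infer_instance

-- ===== CLAIM (what is proved, stated in full; the proofs are below) =====
def Claim_equal_filter_records : Prop := ∀ (rec : List (String × Option String)), Dom_filter_records rec → Spec_filter_records rec (filter_records rec)

-- ===== LEMMAS AND PROOFS =====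

-- If some pair's value is non-empty, the 'all values empty' scan is false.
theorem pv_all_false {rec : List (String × Option String)} {p : String × Option String}
    (hp : p ∈ rec) (hv : pvEmptyValA p.2 = false) :
    ((rec.map (fun q => q.2)).all pvEmptyValA) = false := by
  simp only [List.all_eq_false, List.mem_map]
  exact ⟨p.2, ⟨p, hp, rfl⟩, by simp [hv]⟩

-- ===== VERDICT (by name: the statement is the Claim_ definition above) =====
theorem filter_records_spec : Claim_equal_filter_records := by
  intro rec _
  unfold Spec_filter_records filter_records filter_records_alt
  cases hf : rec.find? (fun p => p.1 == "level") with
  | none =>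
    have hany : rec.any (fun p => p.1 == "level") = false := by
      simp only [List.find?_eq_none] at hf
      simp only [List.any_eq_false]
      exact fun p hp => by simpa using hf p hp
    simp [hany]
  | some p =>
    have hany : rec.any (fun p => p.1 == "level") = true := by
      simp only [List.any_eq_true]
      exact ⟨p, List.mem_of_find?_eq_some hf, by simpa using List.find?_some hf⟩
    have hmem : p ∈ rec := List.mem_of_find?_eq_some hf
    simp only [hany, Bool.not_true, Bool.false_eq_true, if_false]
    obtain ⟨k, v⟩ := p
    cases v with
    | none => simp [pvEmptyValA]
    | some s =>
      by_cases hs : PySem.Str.strip s == ""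
      · simp [pvEmptyValA, beq_iff_eq.mp hs]
      · have hv : pvEmptyValA (some s) = false := by simp [pvEmptyValA, hs]
        simp [hv, pv_all_false hmem hv, beq_iff_eq] at *
        simp [hs]
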